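-- pv_equiv track=rewrite | github.com/QuantumContainer/password_checker | password_checker.py | find_repeated_chars
-- ===== SOURCE A (Python) =====
-- def find_repeated_chars(pw):
--     """Finds characters repeated 3+ times consecutively."""
--     found = []
--     i = 0
--     while i < len(pw):
--         j = i
--         while j < len(pw) and pw[j] == pw[i]:
--             j += 1
--         if j - i >= 3:
--             found.append((pw[i], j - i))
--         i = j
--     return found
-- ===== SOURCE B (Python) =====
-- def find_repeated_chars(pw):
--     """Finds characters repeated 3+ times consecutively."""
--     found = []
--     cur = None
--     count = 0
--     for ch in pw:
--         if ch == cur: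
--             count += 1
--         else:
--             if count >= 3:
--                 found.append((cur, count))
--             cur = ch
--             count = 1
--     if count >= 3:
--         found.append((cur, count))
--     return found
-- ===== Notes on version B (the rewrite author's own statement) =====
-- stated objective: simpler
-- what changed: Replaces the index-jumping nested while loops with a single for-each pass maintaining a current character and running count, flushing a (char,count) pair at each transition and at the end.
import Mathlib
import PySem

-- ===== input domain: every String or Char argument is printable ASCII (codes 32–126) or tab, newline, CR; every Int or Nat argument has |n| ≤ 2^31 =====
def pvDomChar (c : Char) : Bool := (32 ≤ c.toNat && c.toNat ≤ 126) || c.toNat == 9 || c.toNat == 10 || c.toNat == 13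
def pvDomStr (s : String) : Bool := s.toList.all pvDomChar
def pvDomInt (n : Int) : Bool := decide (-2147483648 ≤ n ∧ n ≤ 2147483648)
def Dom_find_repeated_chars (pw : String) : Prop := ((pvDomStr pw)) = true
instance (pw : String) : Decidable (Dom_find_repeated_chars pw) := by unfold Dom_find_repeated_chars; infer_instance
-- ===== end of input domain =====

-- B replaces A's index-jumping nested while loops with a single pass keeping a current character
-- and a running count, flushing at each transition and at the end (objective: simpler).


-- ===== PORT A =====
-- inner while loop of A: length of the run of c at the front of the suffix after position i
def pvRunLen (c : Char) : List Char → Nat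
  | [] => 0
  | x :: xs => if x = c then pvRunLen c xs + 1 else 0

-- outer while loop of A: at each step count the run (j - i), append if ≥ 3, jump i to j
def pvGoA : List Char → List (String × Int)
  | [] => []
  | c :: rest =>
    (if 1 + pvRunLen c rest ≥ 3
      then [(String.ofList [c], ((1 + pvRunLen c rest : Nat) : Int))] else [])
      ++ pvGoA (rest.drop (pvRunLen c rest))
termination_by l => l.length
decreasing_by simp [List.length_drop]

def find_repeated_chars (pw : String) : List (String × Int) := pvGoA pw.toList

-- ===== PORT B =====
-- flush of B: append (cur, count) when count ≥ 3
def pvFlush (found : List (String × Int)) (cur : Option Char) (count : Nat) : List (String × Int) :=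
  if count ≥ 3 then found ++ [(cur.elim "" (fun c => String.ofList [c]), (count : Int))] else found

-- B's single for-each pass over the characters
def pvGoB (found : List (String × Int)) (cur : Option Char) (count : Nat) : List Char → List (String × Int)
  | [] => pvFlush found cur count
  | x :: xs =>
    if some x = cur then pvGoB found cur (count + 1) xs
    else pvGoB (pvFlush found cur count) (some x) 1 xs

def find_repeated_chars_alt (pw : String) : List (String × Int) := pvGoB [] none 0 pw.toList

-- ===== PRECONDITION & SPEC =====
def Spec_find_repeated_chars (pw : String) (out : List (String × Int)) : Prop := out = find_repeated_chars_alt pw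
instance (pw : String) (out : List (String × Int)) : Decidable (Spec_find_repeated_chars pw out) := by unfold Spec_find_repeated_chars; infer_instance

-- ===== CLAIM (what is proved, stated in full; the proofs are below) =====
def Claim_equal_find_repeated_chars : Prop := ∀ (pw : String), Dom_find_repeated_chars pw → Spec_find_repeated_chars pw (find_repeated_chars pw)

-- ===== LEMMAS AND PROOFS =====

lemma pvGoA_nil : pvGoA [] = [] := by rw [pvGoA.eq_def]

lemma pvGoA_cons (c : Char) (rest : List Char) :
    pvGoA (c :: rest) =
      (if 1 + pvRunLen c rest ≥ 3
        then [(String.ofList [c], ((1 + pvRunLen c rest : Nat) : Int))] else [])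
        ++ pvGoA (rest.drop (pvRunLen c rest)) := by
  rw [pvGoA.eq_def]

-- invariant for B's loop while it sits inside a run of c with current count k
lemma pvGoB_run : ∀ (l : List Char) (found : List (String × Int)) (c : Char) (k : Nat),
    pvGoB found (some c) k l =
      found ++ (if k + pvRunLen c l ≥ 3
        then [(String.ofList [c], ((k + pvRunLen c l : Nat) : Int))] else [])
        ++ pvGoA (l.drop (pvRunLen c l)) := by
  intro l
  induction l with
  | nil =>
    intro found c k
    simp [pvGoB, pvFlush, pvRunLen, pvGoA_nil]
    split_ifs <;> simp
  | cons x xs ih =>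
    intro found c k
    by_cases hx : x = c
    · subst hx
      rw [show pvGoB found (some x) k (x :: xs) = pvGoB found (some x) (k + 1) xs from by
        simp [pvGoB]]
      rw [ih]
      simp [pvRunLen]
      have : k + (pvRunLen x xs + 1) = k + 1 + pvRunLen x xs := by omega
      rw [this]
      split_ifs <;> [skip; rfl]
      ring_nf
    · rw [show pvGoB found (some c) k (x :: xs)
          = pvGoB (pvFlush found (some c) k) (some x) 1 xs from by
        simp [pvGoB, hx]]
      rw [ih]
      simp [pvRunLen, hx, pvFlush]
      rw [pvGoA_cons]
      split_ifs <;> simp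

-- ===== VERDICT (by name: the statement is the Claim_ definition above) =====
theorem find_repeated_chars_spec : Claim_equal_find_repeated_chars := by
  intro pw _
  unfold Spec_find_repeated_chars find_repeated_chars find_repeated_chars_alt
  cases h : pw.toList with
  | nil => simp [pvGoA_nil, pvGoB, pvFlush]
  | cons x xs =>
    rw [show pvGoB [] none 0 (x :: xs) = pvGoB (pvFlush [] none 0) (some x) 1 xs from by
      simp [pvGoB]]
    rw [pvGoB_run]
    simp [pvFlush]
    rw [pvGoA_cons]
    simp
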